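-- pv_equiv track=rewrite | github.com/manuel-subredu/python | asd/utils.py | is_array_sorted
-- ===== SOURCE A (Python) =====
-- def is_array_sorted(v):
--     if len(v) == 0:
--         return False
--
--     if len(v) == 1:
--         return v[0] < v[1]
--
--     for i in range(1, len(v) - 1):
--         if v[i] > v[i+1]:
--             return False
--
--     return True
-- ===== SOURCE B (Python) =====
-- def is_array_sorted(v):
--     # idiomatic sort-and-compare: non-empty and already equal to its sorted copy
--     return len(v) > 0 and sorted(v) == v
-- ===== Notes on version B (the rewrite author's own statement) =====
-- stated objective: idiomatic
-- what changed: Replaced the index loop over adjacent pairs (which skips the first pair) with the idiomatic non-empty-and-equal-to-its-sorted-copy one-liner, which also checks the whole list.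
-- intended difference: On lists of length >= 2 whose first element exceeds the second while the rest is non-decreasing (e.g. [5,1,2]), A's loop starts at index 1 and returns True, while B returns False, the intended answer for a sortedness check. — e.g. on is_array_sorted([5, 1, 2]): A returns true, B returns false
import Mathlib
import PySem

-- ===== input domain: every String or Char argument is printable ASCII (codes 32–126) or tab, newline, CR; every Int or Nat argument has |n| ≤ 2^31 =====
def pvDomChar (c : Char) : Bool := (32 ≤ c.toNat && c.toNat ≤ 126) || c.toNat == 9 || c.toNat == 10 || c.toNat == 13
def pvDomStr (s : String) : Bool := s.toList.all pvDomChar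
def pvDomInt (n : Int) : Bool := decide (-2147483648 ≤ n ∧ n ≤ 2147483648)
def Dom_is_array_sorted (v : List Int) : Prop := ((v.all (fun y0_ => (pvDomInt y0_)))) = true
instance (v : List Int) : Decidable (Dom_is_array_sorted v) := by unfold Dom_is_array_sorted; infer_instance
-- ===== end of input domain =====

-- B replaces A's adjacent-pair index loop (which skips the first pair) by the idiomatic
-- sort-and-compare one-liner; A's off-by-one on the first pair is stated as an intended
-- difference D_, and A's IndexError on single-element lists is excluded by Pre_.

-- ===== PORT A =====
-- the 'for i in range(1, len(v)-1)' loop with early return False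
def pvALoop (v : List Int) : List Int → Bool
  | [] => true
  | i :: rest =>
    if PySem.List.pyGetD v i 0 > PySem.List.pyGetD v (i + 1) 0 then false
    else pvALoop v rest

def is_array_sorted (v : List Int) : Bool :=
  if v.length = 0 then false
  else if v.length = 1 then
    -- 'return v[0] < v[1]': v[1] is an IndexError here; Pre_ excludes this branch
    match PySem.List.pyGet? v 0, PySem.List.pyGet? v 1 with
    | some a, some b => decide (a < b)
    | _, _ => false
  else
    pvALoop v (PySem.List.pyRange 1 ((v.length : Int) - 1) 1)

-- ===== PORT B =====
def is_array_sorted_alt (v : List Int) : Bool :=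
  decide (0 < v.length) && (PySem.List.sorted v (fun x => x) false == v)

-- ===== PRECONDITION & SPEC =====
-- Pre_ excludes exactly the single-element lists, on which A raises IndexError (v[1]).
def Pre_is_array_sorted (v : List Int) : Prop := v.length ≠ 1
instance (v : List Int) : Decidable (Pre_is_array_sorted v) := by unfold Pre_is_array_sorted; infer_instance
def pvWitness_is_array_sorted : List Int := [1, 2]

-- On lists of length >= 2 whose first element exceeds the second while the tail is
-- non-decreasing, A's loop starts at index 1 and returns True; B returns False, the
-- intended answer for a sortedness check.
def D_is_array_sorted (v : List Int) : Prop :=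
  2 ≤ v.length ∧ v.getD 1 0 < v.getD 0 0 ∧ v.tail.Pairwise (fun x y => x ≤ y)
instance (v : List Int) : Decidable (D_is_array_sorted v) := by unfold D_is_array_sorted; infer_instance

def Spec_is_array_sorted (v : List Int) (out : Bool) : Prop := ¬ D_is_array_sorted v → out = is_array_sorted_alt v
instance (v : List Int) (out : Bool) : Decidable (Spec_is_array_sorted v out) := by unfold Spec_is_array_sorted; infer_instance

def pvDiffWitness_is_array_sorted : List Int := [5, 1, 2]
def pvDiffWitnessOut_is_array_sorted : Bool × Bool := (true, false)

-- ===== CLAIM =====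
def Claim_unchanged_is_array_sorted : Prop := ∀ (v : List Int), Dom_is_array_sorted v → Pre_is_array_sorted v → Spec_is_array_sorted v (is_array_sorted v)
def Claim_changed_is_array_sorted : Prop := Dom_is_array_sorted (pvDiffWitness_is_array_sorted) ∧ Pre_is_array_sorted (pvDiffWitness_is_array_sorted) ∧ D_is_array_sorted (pvDiffWitness_is_array_sorted) ∧ is_array_sorted (pvDiffWitness_is_array_sorted) = pvDiffWitnessOut_is_array_sorted.1 ∧ is_array_sorted_alt (pvDiffWitness_is_array_sorted) = pvDiffWitnessOut_is_array_sorted.2 ∧ pvDiffWitnessOut_is_array_sorted.1 ≠ pvDiffWitnessOut_is_array_sorted.2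
def Claim_exact_is_array_sorted : Prop := ∀ (v : List Int), Dom_is_array_sorted v → Pre_is_array_sorted v → D_is_array_sorted v → is_array_sorted v ≠ is_array_sorted_alt v

-- ===== LEMMAS AND PROOFS =====

-- A's loop starting at index k checks exactly that v.drop k is a ≤-chain
lemma pvALoop_eq (v : List Int) (k : Nat) :
    pvALoop v (PySem.List.pyRange (k : Int) ((v.length : Int) - 1) 1)
      = decide (List.IsChain (fun a b : Int => a ≤ b) (v.drop k)) := by
  have main : ∀ (n k : Nat), v.length - k = n →
      pvALoop v (PySem.List.pyRange (k : Int) ((v.length : Int) - 1) 1)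
        = decide (List.IsChain (fun a b : Int => a ≤ b) (v.drop k)) := by
    intro n
    induction n with
    | zero =>
      intro k hk
      have hlen : v.length ≤ k := by omega
      rw [PySem.List.pyRange_one_eq_nil (by omega : ((v.length : Int) - 1) ≤ (k : Int))]
      rw [List.drop_eq_nil_of_le hlen]
      simp [pvALoop]
    | succ n ih =>
      intro k hk
      have hklen : k < v.length := by omega
      by_cases h2 : k + 1 < v.length
      · rw [PySem.List.pyRange_one_cons (by omega : (k : Int) < (v.length : Int) - 1)]
        have e1 : PySem.List.pyGetD v (k : Int) 0 = v[k] := by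
          have := PySem.List.pyGetD_eq_getElem v (i := (k : Int)) 0 (by omega) (by omega)
          simpa using this
        have e2 : PySem.List.pyGetD v ((k : Int) + 1) 0 = v[k + 1] := by
          have := PySem.List.pyGetD_eq_getElem v (i := (k : Int) + 1) 0 (by omega) (by omega)
          simpa using this
        have hdk : v.drop k = v[k] :: v.drop (k + 1) := List.drop_eq_getElem_cons hklen
        have hdk1 : v.drop (k + 1) = v[k + 1] :: v.drop (k + 2) := List.drop_eq_getElem_cons h2
        have ihk : pvALoop v (PySem.List.pyRange ((k + 1 : Nat) : Int) ((v.length : Int) - 1) 1)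
            = decide (List.IsChain (fun a b : Int => a ≤ b) (v.drop (k + 1))) := ih (k + 1) (by omega)
        push_cast at ihk
        rw [pvALoop, e1, e2, ihk]
        by_cases hgt : v[k + 1] < v[k]
        · rw [if_pos hgt]
          symm
          rw [decide_eq_false_iff_not, hdk, hdk1, List.isChain_cons_cons]
          rintro ⟨hle, -⟩
          omega
        · rw [if_neg hgt, decide_eq_decide, hdk, hdk1, List.isChain_cons_cons, ← hdk1]
          exact ⟨fun h => ⟨by omega, h⟩, fun h => h.2⟩
      · -- k + 1 = v.length : empty range, drop k is a singleton
        rw [PySem.List.pyRange_one_eq_nil (by omega : ((v.length : Int) - 1) ≤ (k : Int))]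
        have hsing : v.drop k = [v[k]] := by
          rw [List.drop_eq_getElem_cons hklen, List.drop_eq_nil_of_le (by omega)]
        rw [hsing]
        simp [pvALoop]
  exact main (v.length - k) k rfl

-- B equals the decidable whole-list pairwise-sortedness test
lemma alt_eq (v : List Int) :
    is_array_sorted_alt v = decide (0 < v.length ∧ v.Pairwise (fun a b : Int => a ≤ b)) := by
  unfold is_array_sorted_alt
  by_cases hp : v.Pairwise (fun a b : Int => a ≤ b)
  · rw [PySem.List.sorted_eq_self_of_pairwise v (fun x => x) (by simpa using hp)]
    by_cases h0 : 0 < v.length <;> simp [h0, hp]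
  · have hne : PySem.List.sorted v (fun x => x) ≠ v := by
      intro h
      apply hp
      have := PySem.List.sorted_pairwise v (fun x => x)
      rw [h] at this
      simpa using this
    simp [hne, hp]

-- the length bound of A's range, rewritten for a two-element-headed list
lemma pvLenBound (a b : Int) (t : List Int) :
    ((a :: b :: t).length : Int) - 1 = (t.length : Int) + 1 := by
  push_cast [List.length_cons]
  ring

-- A on a list of length ≥ 2 decides chain-ness of the tail
lemma a_cons_cons (a b : Int) (t : List Int) :
    is_array_sorted (a :: b :: t) = decide (List.IsChain (fun x y : Int => x ≤ y) (b :: t)) := by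
  unfold is_array_sorted
  rw [if_neg (by simp), if_neg (by simp)]
  have hl := pvALoop_eq (a :: b :: t) 1
  rw [pvLenBound] at hl
  norm_num at hl ⊢
  exact hl

-- ===== VERDICT =====
theorem is_array_sorted_spec : Claim_unchanged_is_array_sorted := by
  intro v _ hpre
  unfold Spec_is_array_sorted
  intro hnd
  match v with
  | [] => decide
  | [a] => exact absurd rfl hpre
  | a :: b :: t =>
    rw [a_cons_cons, alt_eq]
    unfold D_is_array_sorted at hnd
    by_cases hchain : List.IsChain (fun x y : Int => x ≤ y) (b :: t)
    · have htp : (b :: t).Pairwise (fun x y : Int => x ≤ y) :=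
        List.isChain_iff_pairwise.mp hchain
      have hab : a ≤ b := by
        by_contra hab
        exact hnd ⟨by simp, by simp; omega, by simpa using htp⟩
      have hwp : (a :: b :: t).Pairwise (fun x y : Int => x ≤ y) := by
        refine List.Pairwise.cons ?_ htp
        intro x hx
        rcases List.mem_cons.mp hx with heq | hmem
        · subst heq; omega
        · have hb : b ≤ x := (List.pairwise_cons.mp htp).1 x hmem
          omega
      simp [hchain, hwp]
    · have hnp : ¬ (a :: b :: t).Pairwise (fun x y : Int => x ≤ y) := fun hp =>
        hchain (List.isChain_iff_pairwise.mpr (List.pairwise_cons.mp hp).2)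
      simp [hchain, hnp]

theorem is_array_sorted_changed : Claim_changed_is_array_sorted := by
  unfold Claim_changed_is_array_sorted; decide

theorem is_array_sorted_tight : Claim_exact_is_array_sorted := by
  intro v _ _ hd
  unfold D_is_array_sorted at hd
  obtain ⟨hlen, hba, htp⟩ := hd
  match v with
  | a :: b :: t =>
    simp only [List.getD_cons_zero, List.getD_cons_succ] at hba
    simp only [List.tail_cons] at htp
    rw [a_cons_cons, alt_eq]
    have hchain : List.IsChain (fun x y : Int => x ≤ y) (b :: t) :=
      List.isChain_iff_pairwise.mpr htp
    have hnp : ¬ (a :: b :: t).Pairwise (fun x y : Int => x ≤ y) := by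
      intro hp
      have := (List.pairwise_cons.mp hp).1 b (by simp)
      omega
    simp [hchain, hnp]
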